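/- GENERATED by mk_final_copies.py from the proof of the farm's unit `vorbis_decode_packet_rest.2c` (farm:vorbis_decode_packet_rest.2c.1: Lemmas.lean) as the
   re-elaboration sweep compiled it — do not edit. -/
import Asan.CheckWalk
import Vorbis.Spec.PacketRestFrame
import Vorbis.Spec.Units.vorbis_decode_packet_rest_2c

/-!
  Pure lemmas for the unit `vorbis_decode_packet_rest.2c` (0x111403 … 0x111421): where the block at `finalY[i]` lies and how big it
  is (`seg2c_fy_where`), the value of `ilog(range)` for the four entries of `range_list` (`seg2c_ilog_val`), and the part of the
  assertions `At2c` / `At2d` that is carried through the whole segment (`Seg2cCore`) with its frame lemma (`seg2c_core_carry`).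
-/

namespace Vorbis.Spec.vorbis_decode_packet_rest_2c
open X86 X86.User Asan Vorbis Vorbis.Spec Vorbis.Spec.vorbis_decode_packet_rest

variable {others : List Obj} {frames' : List (Nat × FrameLayout)} {len : Nat} {Ar : Arena} {stored room : Int}
  {ysz : Nat → Nat} {mem : Mem} {f : Nat}

/-- **Where the block at `finalY[i]` lies, and that it holds `finalY[0]` and `finalY[1]`** (FY1 with the sizes named, FL8
`2 ≤ values`): an arena setup block of at least four bytes — above the text, below C00000H, off the stack region including the
two stack arguments, and off `*f` (SEP). One arithmetic fact for the walker and `u_omega`. `g` is any floor of `f`. -/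
theorem seg2c_fy_where (hinv : DecodeInv others frames' len Ar stored room ysz mem f) {i : Nat}
    (hi : (i : Int) < stb_vorbis.channels mem f) {g : Nat} (hg : IsFloor mem f g) :
    4 ≤ ysz i ∧
    0x119d40 ≤ stb_vorbis.finalY mem f i ∧ stb_vorbis.finalY mem f i + ysz i ≤ 0xC00000 ∧
      (stb_vorbis.finalY mem f i + ysz i ≤ 0x700000 ∨ 0x800020 ≤ stb_vorbis.finalY mem f i) ∧
      (stb_vorbis.finalY mem f i + ysz i ≤ f ∨ f + 1808 ≤ stb_vorbis.finalY mem f i) := by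
  have hb := (hinv.fy i hi).1
  have hA := hinv.arena
  have htext := hinv.arenaText
  have hfl := hinv.fb.vorbis.floor
  obtain ⟨idx, hidx, hgeq⟩ := hg
  have hvb := (hfl.floors idx hidx).values_bounds
  have hsz := (hinv.fy i hi).2 idx hidx
  have h4 : 4 ≤ ysz i := by omega
  have hC : SampleBuf (RunBlk Ar len) mem f ⟨stb_vorbis.finalY mem f i, ysz i⟩ := SampleBuf.finalY i hi (ysz i) hb
  have hd := hinv.sep.bufobj _ hC
  simp only [vblock, voff] at hd
  have et : Vorbis.L.textHi = 0x119d40 := rfl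
  rcases hinv.buf _ hC with h0 | hblk
  · simp only [] at h0
    omega
  · have hr := hA.block_range (p := stb_vorbis.finalY mem f i) (n := ysz i) hblk
    have hl := le_r8 (ysz i)
    have h1 := hA.AR1
    have h1x := hA.AR1x
    have h2 := hA.AR2
    omega

/-- **`ilog(range)` for the four entries of `range_list`** (256, 128, 86, 64; SH7): 9, 8, 7, 7 — so `ilog(range) − 1` is a lawful bit
count for get_bits. The argument has the form the walker gives edi after `mov edi, [rsp + 0x4c]`. -/
theorem seg2c_ilog_val (rg : Nat) (h : rg = 256 ∨ rg = 128 ∨ rg = 86 ∨ rg = 64) :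
    7 ≤ ilogVal (Word.part .w32 (Word.ofBV (BitVec.ofNat 32 rg))).toInt ∧
      ilogVal (Word.part .w32 (Word.ofBV (BitVec.ofNat 32 rg))).toInt ≤ 9 := by
  rcases h with rfl | rfl | rfl | rfl <;> decide

/-- **The bit count `ilog(range) − 1` is lawful for get_bits**: esi after `lea esi, [rax − 1]` with `7 ≤ rax ≤ 9`, in the form the
walker gives it, read as `bitsArg` reads it. -/
theorem seg2c_bits_arg (z : Nat) (h7 : 7 ≤ z) (h9 : z ≤ 9) :
    (Word.ofBV (BitVec.setWidth 32 (UInt64.ofNat z - 1).toBitVec)).toNat % 2 ^ 32 ≤ 32 := by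
  have hz : z = 7 ∨ z = 8 ∨ z = 9 := by omega
  rcases hz with rfl | rfl | rfl <;> decide

/-- **What segment .2c carries from its entry to its exit**: `At2d` without the `rip` clause (= `At2c` without `rip` and the
`range` slot): STABLE ∧ `r14 = i`, `i < C` ∧ `r13 = map` ∧ `r15 = g` ∧ `rbp = f` ∧ `r12 = [0x20] = finalY = f->finalY[i]`. It holds
at the entry (`Seg2cCore.of_at2c`), at the return of `ilog` (0x11141b) and at the return of `get_bits` (0x111426:
`Seg2cCore.to_at2d`). -/
structure Seg2cCore (u₀ : State) (others : List Obj) (frames : List (Nat × FrameLayout)) (len : Nat) (Ar : Arena)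
    (stored room : Int) (mode : Nat) (ysz : Nat → Nat) (u : State) (ret : Word)
    (i : Nat) (v : State) : Prop
    extends Stable u₀ others frames len Ar stored room mode ysz u ret (lsOf u) v where
  /-- the channel index -/
  r14 : v.reg .r14 = UInt64.ofNat i
  /-- `i < f->channels` -/
  i_lt : (i : Int) < stb_vorbis.channels v.mem (fOf u)
  /-- `r13 = map` -/
  r13 : (v.reg .r13).toNat = mapOf v.mem (fOf u) (mOf u)
  /-- `r15 = g`, the Floor1 record of channel `i` -/
  g : IsFloor v.mem (fOf u) (v.reg .r15).toNat
  /-- `rbp = f` -/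
  rbp : (v.reg .rbp).toNat = fOf u
  /-- `r12 = finalY = f->finalY[i]` -/
  r12 : (v.reg .r12).toNat = stb_vorbis.finalY v.mem (fOf u) i
  /-- the spill of `finalY` -/
  slot_finalY : slot64 u v 0x20 = stb_vorbis.finalY v.mem (fOf u) i

/-- The entry assertion `At2c` contains the carried part. -/
theorem Seg2cCore.of_at2c {u₀ : State} {frames : List (Nat × FrameLayout)} {mode : Nat} {e v : State} {ret : Word} {i : Nat}
    (h : At2c u₀ others frames len Ar stored room mode ysz e ret i v) :
    Seg2cCore u₀ others frames len Ar stored room mode ysz e ret i v :=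
  { toStable := h.toStable, r14 := h.r14, i_lt := h.i_lt, r13 := h.r13, g := h.g, rbp := h.rbp, r12 := h.r12,
    slot_finalY := h.slot_finalY }

/-- The carried part at the return address 0x111426 is the exit assertion `At2d`. -/
theorem Seg2cCore.to_at2d {u₀ : State} {frames : List (Nat × FrameLayout)} {mode : Nat} {e v : State} {ret : Word} {i : Nat}
    (h : Seg2cCore u₀ others frames len Ar stored room mode ysz e ret i v)
    (hrip : v.rip = Vorbis.L.vorbis_decode_packet_rest.cut21) :
    At2d u₀ others frames len Ar stored room mode ysz e ret i v :=
  { toStable := h.toStable, rip := hrip, r14 := h.r14, i_lt := h.i_lt, r13 := h.r13, g := h.g, rbp := h.rbp, r12 := h.r12,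
    slot_finalY := h.slot_finalY }

/-- **The carried part over a batch of stores** (the tree's `Stable.carry` + `config_carry`): from the state `v` to a state `s`
whose memory differs only in `SpanOK` spans (the function's scratch stack, the bit reader's windows of `*f`, the block at
`finalY[i]`), with the steady rsp again, the five callee-saved registers `r12 – r15`, `rbp` as in `v`, and the spill slot `[0x20]`
reading the same. `hbits` is `Bits` of the new memory (the caller's: from a callee's post, or `Bits.frame_fields`). -/
theorem seg2c_core_carry {u₀ : State} {frames : List (Nat × FrameLayout)} {mode : Nat} {e v s : State} {ret : Word} {i : Nat}
    (hc : Seg2cCore u₀ others frames len Ar stored room mode ysz e ret i v)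
    {spans : List Span} (hs : Mem.SameExcept spans v.mem s.mem)
    (hsp : ∀ w, w ∈ spans → SpanOK ysz v.mem (e.reg .rsp).toNat (fOf e) w)
    (hun : ShadowUntouched v.mem s.mem)
    (hrsp : s.reg .rsp = spOf e) (hcode : Vorbis.CodeOK u₀ s.mem) (habi : abiInv s)
    (hbits : Bits (RunBlk Ar len) len s.mem (fOf e))
    (h12 : s.reg .r12 = v.reg .r12) (h13 : s.reg .r13 = v.reg .r13) (h14 : s.reg .r14 = v.reg .r14)
    (h15 : s.reg .r15 = v.reg .r15) (hbp : s.reg .rbp = v.reg .rbp)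
    (hslot : slot64 e s 0x20 = slot64 e v 0x20) :
    Seg2cCore u₀ others frames len Ar stored room mode ysz e ret i s := by
  have hR1 : 0x700000 + 3856 ≤ (e.reg .rsp).toNat := hc.entry.room
  have hR2 : (e.reg .rsp).toNat + 8 ≤ 0x800000 := hc.entry.top
  have hst := Stable.carry hc.toStable hs hsp hun hrsp hcode habi hbits
  obtain ⟨ech, emode, efy, efloor⟩ := config_carry hc.inv hR1 hR2 hs hsp
  have hm := mode_record_inside hc.pre
  have hC16 := hc.inv.config.header.HD1.2
  have hilt := hc.i_lt
  have hi16 : i < 16 := by omega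
  refine { toStable := hst, r14 := ?_, i_lt := ?_, r13 := ?_, g := ?_, rbp := ?_, r12 := ?_, slot_finalY := ?_ }
  · rw [h14]
    exact hc.r14
  · rw [ech]
    exact hilt
  · rw [h13, (emode (mOf e) hm.1 hm.2).2]
    exact hc.r13
  · rw [h15]
    exact efloor _ hc.g
  · rw [hbp]
    exact hc.rbp
  · rw [h12, efy i hi16]
    exact hc.r12
  · rw [hslot, efy i hi16]
    exact hc.slot_finalY

end Vorbis.Spec.vorbis_decode_packet_rest_2c
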